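-- pv_equiv track=rewrite | github.com/VirtueZhao/Measuring_Drift_Severity_By_Tree_Structure_Classifiers | Experiment/MTVlib.py | group_vectors
-- ===== SOURCE A (Python) =====
-- def group_vectors(vectors):
--     vec_dict = {}
--     for v in vectors:
--         path = v[:-1]
--         result = v[-1]
--
--         key = str(result[0]) + "_" + str(result[1])
--         if key not in vec_dict:
--             paths = []
--             paths.append(path)
--             vec_dict[key] = paths
--         else:
--             paths = vec_dict[key]
--             paths.append(path)
--             vec_dict[key] = paths
--
--     return vec_dict
-- ===== SOURCE B (Python) =====
-- def group_vectors(vectors):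
--     # Same grouping as A, built by per-key comprehension instead of a
--     # single-pass dict accumulation: collect the distinct keys in order of
--     # first appearance, then gather each group's paths with a filter pass.
--     def keyf(v):
--         return str(v[-1][0]) + "_" + str(v[-1][1])
--     keys = dict.fromkeys(keyf(v) for v in vectors)
--     return {k: [v[:-1] for v in vectors if keyf(v) == k] for k in keys}
-- ===== Notes on version B (the rewrite author's own statement) =====
-- stated objective: alternative
-- what changed: Replaced the single-pass dict accumulation (membership test, fetch list, append, re-store) by a two-phase scheme: dedup the keys in first-appearance order, then build each group with a per-key filter comprehension.
import Mathlib
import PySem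

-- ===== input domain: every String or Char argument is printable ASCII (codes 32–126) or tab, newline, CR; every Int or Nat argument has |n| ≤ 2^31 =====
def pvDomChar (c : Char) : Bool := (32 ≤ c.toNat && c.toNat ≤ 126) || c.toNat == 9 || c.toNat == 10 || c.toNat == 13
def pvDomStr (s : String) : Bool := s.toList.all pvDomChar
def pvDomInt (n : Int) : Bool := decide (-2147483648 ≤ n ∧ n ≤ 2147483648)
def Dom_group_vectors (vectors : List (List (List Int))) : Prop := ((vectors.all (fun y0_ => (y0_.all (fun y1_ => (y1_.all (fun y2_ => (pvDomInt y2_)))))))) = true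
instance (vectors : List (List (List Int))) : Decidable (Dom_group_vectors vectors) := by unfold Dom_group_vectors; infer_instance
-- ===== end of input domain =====

-- B groups the vectors by per-key filter passes over deduplicated first-appearance keys
-- instead of A's single-pass dict accumulation; equal output, no speed claim.


-- ===== PORT A =====
def group_vectors (vectors : List (List (List Int))) : List (String × List (List (List Int))) :=
  (vectors.foldl (fun vec_dict v =>
      let path := PySem.List.slice v none (some (-1))
      let result := (PySem.List.pyGet? v (-1)).getD []
      let key := PySem.Int.toStr ((PySem.List.pyGet? result 0).getD 0) ++ "_"
                   ++ PySem.Int.toStr ((PySem.List.pyGet? result 1).getD 0)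
      if !(vec_dict.contains key) then
        vec_dict.insert key [path]
      else
        vec_dict.insert key (vec_dict.getD key [] ++ [path]))
    PySem.Dict.empty).items

-- ===== PORT B =====
-- Source B's helper keyf
def pvKeyf (v : List (List Int)) : String :=
  let result := (PySem.List.pyGet? v (-1)).getD []
  PySem.Int.toStr ((PySem.List.pyGet? result 0).getD 0) ++ "_"
    ++ PySem.Int.toStr ((PySem.List.pyGet? result 1).getD 0)

def group_vectors_alt (vectors : List (List (List Int))) : List (String × List (List (List Int))) :=
  let keys := PySem.List.dedup (vectors.map pvKeyf)
  keys.map (fun k => (k,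
    (vectors.filter (fun v => pvKeyf v == k)).map
      (fun v => PySem.List.slice v none (some (-1)))))

-- ===== PRECONDITION & SPEC =====
-- Pre_ excludes exactly the inputs where the Python A raises IndexError:
-- some vector is empty (v[-1]) or its last element has fewer than 2 entries (result[1]).
def Pre_group_vectors (vectors : List (List (List Int))) : Prop :=
  ∀ v ∈ vectors, v ≠ [] ∧ 2 ≤ ((v.getLast?).getD []).length
instance (vectors : List (List (List Int))) : Decidable (Pre_group_vectors vectors) := by unfold Pre_group_vectors; infer_instance
def pvWitness_group_vectors : List (List (List Int)) := [[[1, 2], [0, 1]], [[3], [0, 1]], [[0, 1]]]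

def Spec_group_vectors (vectors : List (List (List Int))) (out : List (String × List (List (List Int)))) : Prop := out = group_vectors_alt vectors
instance (vectors : List (List (List Int))) (out : List (String × List (List (List Int)))) : Decidable (Spec_group_vectors vectors out) := by unfold Spec_group_vectors; infer_instance

-- ===== CLAIM (what is proved, stated in full; the proofs are below) =====
def Claim_equal_group_vectors : Prop := ∀ (vectors : List (List (List Int))), Dom_group_vectors vectors → Pre_group_vectors vectors → Spec_group_vectors vectors (group_vectors vectors)

-- ===== LEMMAS AND PROOFS =====

-- the value appended for each vector
def pvPath (v : List (List Int)) : List (List Int) := PySem.List.slice v none (some (-1))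

-- A's loop body is exactly a Dict.modify at key (pvKeyf v)
theorem pvStepA_eq_modify (d : PySem.Dict String (List (List (List Int)))) (v : List (List Int)) :
    (if !(d.contains (pvKeyf v)) then
        d.insert (pvKeyf v) [pvPath v]
      else
        d.insert (pvKeyf v) (d.getD (pvKeyf v) [] ++ [pvPath v]))
      = d.modify (pvKeyf v) [] (· ++ [pvPath v]) := by
  by_cases h : d.contains (pvKeyf v)
  · simp [h, PySem.Dict.modify]
  · have hg : d.getD (pvKeyf v) [] = [] :=
      PySem.Dict.getD_of_not_contains d [] (by simpa using h)
    simp [h, PySem.Dict.modify, hg]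

theorem group_vectors_eq_modify_fold (vectors : List (List (List Int))) :
    group_vectors vectors =
      ((vectors.map (fun v => (pvKeyf v, pvPath v))).foldl
        (fun d p => d.modify p.1 [] (· ++ [p.2])) PySem.Dict.empty).items := by
  unfold group_vectors
  rw [List.foldl_map]
  refine congrArg PySem.Dict.items (PySem.List.foldl_congr_mem (l := vectors)
    (f := _) (g := _) (init := PySem.Dict.empty) ?_)
  intro d v _
  exact pvStepA_eq_modify d v

-- ===== VERDICT (by name: the statement is the Claim_ definition above) =====
theorem group_vectors_spec : Claim_equal_group_vectors := by
  intro vectors _ _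
  unfold Spec_group_vectors
  rw [group_vectors_eq_modify_fold]
  set l := vectors.map (fun v => (pvKeyf v, pvPath v)) with hl
  have hnd : ((l.foldl (fun d p => d.modify p.1 [] (· ++ [p.2])) PySem.Dict.empty).keys).Nodup :=
    PySem.Dict.nodup_keys_foldl_modify_key l (fun p => p.1) [] (fun d p => (· ++ [p.2]))
      PySem.Dict.empty PySem.Dict.nodup_keys_empty
  have hkeys : (l.foldl (fun d p => d.modify p.1 [] (· ++ [p.2])) PySem.Dict.empty).keys
      = PySem.List.dedup (vectors.map pvKeyf) := by
    rw [PySem.Dict.keys_foldl_modify_key (l := l) (key := Prod.fst)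
      (d0 := ([] : List (List (List Int)))) (f := fun d p => (· ++ [p.2]))
      (d := PySem.Dict.empty)]
    simp [hl, PySem.Set.update_nil_left, List.map_map, Function.comp_def]
  rw [PySem.Dict.items_eq_map_keys _ hnd [], hkeys]
  unfold group_vectors_alt
  apply List.map_congr_left
  intro k _
  congr 1
  rw [PySem.Dict.getD_foldl_modify_append]
  simp [hl, List.filter_map, List.map_map, Function.comp_def, pvPath]
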